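-- pv_equiv track=rewrite | github.com/starkware-libs/sequencer | crates/apollo_propeller/docs/estimate_bandwidth.py | _compute_s_coal_subset
-- ===== SOURCE A (Python) =====
-- def _compute_s_coal_subset(stakes: list[int], total: int) -> int:
--     """Minimum subset sum of *stakes* that is >= ceil(total / 3).
--
--     Same algorithm as compute_s_coal but takes explicit total (for when the
--     threshold is computed against a subset total, e.g. non-publisher stake).
--     """
--     threshold = -(-total // 3)  # ceil(total / 3)
--
--     achievable = 1
--     for s in stakes:
--         achievable |= achievable << s
--
--     mask = achievable >> threshold
--     if mask == 0:
--         return total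
--
--     lowest_bit_pos = (mask & -mask).bit_length() - 1
--     return threshold + lowest_bit_pos
-- ===== SOURCE B (Python) =====
-- def _compute_s_coal_subset(stakes: list[int], total: int) -> int:
--     """Minimum subset sum of *stakes* that is >= ceil(total / 3).
--
--     Divide and conquer: the reachable subset sums of a list are the pairwise
--     sums of the reachable sums of its two halves; then take the smallest
--     reachable sum at or above the threshold, falling back to total.
--     """
--     threshold = -(-total // 3)  # ceil(total / 3)
--
--     def reach(xs):
--         if len(xs) <= 1:
--             return {0} | set(xs)
--         mid = len(xs) // 2
--         left = reach(xs[:mid])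
--         right = reach(xs[mid:])
--         return {a + b for a in left for b in right}
--
--     candidates = [v for v in reach(stakes) if v >= threshold]
--     return min(candidates) if candidates else total
-- ===== Notes on version B (the rewrite author's own statement) =====
-- stated objective: alternative
-- what changed: Replaces A's left-to-right big-integer bitset fold (shift-and-or of one bignum per stake, then lowest-set-bit extraction on the shifted mask) with a divide-and-conquer recursion: the reachable subset sums of the list are the pairwise sums of the reachable sums of its two halves, then min over the sums reaching the threshold (falling back to total).
import Mathlib
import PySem

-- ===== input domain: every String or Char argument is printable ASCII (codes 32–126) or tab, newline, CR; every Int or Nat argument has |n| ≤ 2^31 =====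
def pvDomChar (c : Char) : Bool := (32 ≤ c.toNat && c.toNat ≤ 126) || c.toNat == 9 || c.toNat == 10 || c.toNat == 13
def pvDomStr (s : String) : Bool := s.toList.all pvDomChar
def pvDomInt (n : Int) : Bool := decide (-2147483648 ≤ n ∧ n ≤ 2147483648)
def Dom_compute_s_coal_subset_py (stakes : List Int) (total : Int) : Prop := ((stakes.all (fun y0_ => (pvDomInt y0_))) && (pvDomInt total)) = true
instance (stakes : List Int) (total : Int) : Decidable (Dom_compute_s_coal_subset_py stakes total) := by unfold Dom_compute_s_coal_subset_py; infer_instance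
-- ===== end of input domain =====

-- B replaces A's left-to-right big-integer bitset fold (shift-and-or per stake, then lowest-bit
-- extraction of the shifted mask) by a divide-and-conquer: the reachable subset sums of the list
-- are the pairwise sums of the reachable sums of its two halves; then min of the sums >= threshold,
-- falling back to total. Equivalence of the return values on Pre_ is proved below.

-- ===== PORT A =====
-- Python '<<' / '>>' raise ValueError on a negative shift count; Pre_ gives 0 ≤ s and 0 ≤ threshold,
-- where '.toNat' is exact.
def compute_s_coal_subset_py (stakes : List Int) (total : Int) : Int :=
  let threshold : Int := -(PySem.Int.floordiv (-total) 3)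
  -- 'achievable << s' is core's shift with a Nat count, written as Int.shiftLeft to pin the Int-by-Nat overload
  let achievable : Int := stakes.foldl (fun achievable s => PySem.Int.bor achievable (Int.shiftLeft achievable s.toNat)) 1
  let mask : Int := achievable >>> threshold.toNat
  if mask = 0 then total
  else
    -- int.bit_length, applied to the positive value mask & -mask, is ported as Nat.log2 + 1 (exact on positive ints)
    let lowest_bit_pos : Int := ((PySem.Int.band mask (-mask)).toNat.log2 + 1 : Int) - 1
    threshold + lowest_bit_pos

-- ===== PORT B =====
-- reach(xs): reachable subset sums of xs by halving; the set comprehension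
-- '{a + b for a in left for b in right}' is Set.ofList of the flatMap of pairwise sums.
-- The fuel argument (initially l.length, strictly decreasing with the halving) only makes the
-- same recursion structural; it never changes the computed value.
def pvReachF : Nat → List Int → PySem.Set Int
  | 0, l => PySem.Set.union (PySem.Set.ofList [0]) (PySem.Set.ofList l)     -- only reached with l = []
  | fuel+1, l =>
    if l.length ≤ 1 then
      PySem.Set.union (PySem.Set.ofList [0]) (PySem.Set.ofList l)     -- {0} | set(xs)
    else
      let mid := l.length / 2
      let left := pvReachF fuel (l.take mid)
      let right := pvReachF fuel (l.drop mid)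
      PySem.Set.ofList (left.flatMap (fun a => right.map (fun b => a + b)))

def pvReach (l : List Int) : PySem.Set Int := pvReachF l.length l

def compute_s_coal_subset_py_alt (stakes : List Int) (total : Int) : Int :=
  let threshold : Int := -(PySem.Int.floordiv (-total) 3)
  let candidates : List Int := (pvReach stakes).filter (fun v => decide (threshold ≤ v))
  match PySem.List.min? candidates (fun v => v) with
  | some m => m
  | none => total

-- ===== PRECONDITION & SPEC =====
-- Pre_ excludes exactly the inputs on which A raises ValueError ('negative shift count'):
-- a negative stake, or total ≤ -3 (which makes the ceil-threshold negative).
def Pre_compute_s_coal_subset_py (stakes : List Int) (total : Int) : Prop :=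
  (∀ s ∈ stakes, 0 ≤ s) ∧ -2 ≤ total
instance (stakes : List Int) (total : Int) : Decidable (Pre_compute_s_coal_subset_py stakes total) := by
  unfold Pre_compute_s_coal_subset_py; infer_instance

def pvWitness_compute_s_coal_subset_py : List Int × Int := ([1, 2, 3], 6)

def Spec_compute_s_coal_subset_py (stakes : List Int) (total : Int) (out : Int) : Prop := out = compute_s_coal_subset_py_alt stakes total
instance (stakes : List Int) (total : Int) (out : Int) : Decidable (Spec_compute_s_coal_subset_py stakes total out) := by unfold Spec_compute_s_coal_subset_py; infer_instance

-- ===== CLAIM (what is proved, stated in full; the proofs are below) =====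
def Claim_equal_compute_s_coal_subset_py : Prop := ∀ (stakes : List Int) (total : Int), Dom_compute_s_coal_subset_py stakes total → Pre_compute_s_coal_subset_py stakes total → Spec_compute_s_coal_subset_py stakes total (compute_s_coal_subset_py stakes total)

-- ===== LEMMAS AND PROOFS =====

-- A's fold over the bits of one Nat
def pvNatFold (stakes : List Int) (a : Nat) : Nat :=
  stakes.foldl (fun a s => a ||| (a <<< s.toNat)) a

lemma pv_cast_fold (stakes : List Int) (aN : Nat) :
    stakes.foldl (fun a s => PySem.Int.bor a (Int.shiftLeft a s.toNat)) (aN : Int) = ((pvNatFold stakes aN : Nat) : Int) := by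
  induction stakes generalizing aN with
  | nil => simp [pvNatFold]
  | cons s tl ih =>
    simp only [pvNatFold, List.foldl_cons]
    rw [show Int.shiftLeft (aN : Int) s.toNat = ((aN <<< s.toNat : Nat) : Int) from (Int.natCast_shiftLeft aN s.toNat).symm,
      PySem.Int.bor_natCast]
    exact ih _

lemma pv_thresh_nonneg (total : Int) (h : -2 ≤ total) : 0 ≤ -(PySem.Int.floordiv (-total) 3) := by
  have h1 : PySem.Int.floordiv (-total) 3 < 1 := by
    rw [PySem.Int.floordiv_lt_iff_lt_mul (by norm_num)]
    omega
  omega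

lemma pv_band_neg (m : Nat) (hm : m ≠ 0) :
    PySem.Int.band (m : Int) (-(m : Int)) = ((m - (m &&& (m - 1)) : Nat) : Int) := by
  have h0 : (0:Int) ≤ (m:Int) := by positivity
  have hpos : (0:Int) < (m:Int) := by exact_mod_cast Nat.pos_of_ne_zero hm
  simp only [PySem.Int.band, if_pos h0, if_neg (by omega : ¬ (0:Int) ≤ -(m:Int))]
  have e1 : ((m:Int)).toNat = m := Int.toNat_natCast m
  have e2 : (-(-(m:Int)) - 1).toNat = m - 1 := by omega
  rw [e1, e2]

lemma pv_lowbit (m : Nat) (hm : m ≠ 0) :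
    ∃ j : Nat, m - (m &&& (m - 1)) = 2 ^ j ∧ m.testBit j = true ∧ ∀ i < j, m.testBit i = false := by
  obtain ⟨j, q, hodd, rfl⟩ := Nat.exists_eq_two_pow_mul_odd hm
  obtain ⟨k, rfl⟩ := hodd
  have hp1 : 1 ≤ 2 ^ j := Nat.one_le_two_pow
  have e : 2 ^ j * (2 * k + 1) = 2 ^ j * (2 * k) + 2 ^ j := by ring
  have h1 : 2 ^ j * (2 * k + 1) - 1 = 2 ^ j * (2 * k) + (2 ^ j - 1) := by omega
  have hand : (2 ^ j * (2 * k + 1)) &&& (2 ^ j * (2 * k + 1) - 1) = 2 ^ j * (2 * k) := by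
    apply Nat.eq_of_testBit_eq
    intro i
    rw [Nat.testBit_and, h1, Nat.testBit_two_pow_mul_add _ (by omega),
      Nat.testBit_two_pow_mul, Nat.testBit_two_pow_mul]
    by_cases hij : i < j
    · simp [Nat.not_le.mpr hij]
    · rw [Nat.not_lt] at hij
      rw [if_neg (by omega), decide_eq_true (by omega : i ≥ j)]
      rcases Nat.eq_or_lt_of_le hij with h | h
      · subst h
        simp [Nat.testBit_zero, Nat.mul_mod_right]
      · obtain ⟨t, ht⟩ : ∃ t, i - j = t + 1 := ⟨i - j - 1, by omega⟩
        rw [ht, Nat.testBit_succ, Nat.testBit_succ]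
        have : (2 * k + 1) / 2 = k := by omega
        rw [this, (by omega : 2 * k / 2 = k)]
        simp [Bool.and_self]
  refine ⟨j, by omega, ?_, ?_⟩
  · rw [Nat.testBit_two_pow_mul]
    simp [Nat.testBit_zero]
  · intro i hi
    rw [Nat.testBit_two_pow_mul]
    simp [Nat.not_le.mpr hi]

-- A's bitset: bit k of the fold is set iff some sublist of the stakes sums to k (offset by a set bit of the accumulator)
lemma pv_fold_char (l : List Int) (hs : ∀ s ∈ l, 0 ≤ s) : ∀ (a : Nat) (k : Nat),
    ((pvNatFold l a).testBit k = true ↔ ∃ j : Nat, a.testBit j = true ∧ ∃ t : List Int, t.Sublist l ∧ (j : Int) + t.sum = (k : Int)) := by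
  induction l with
  | nil =>
    intro a k
    simp only [pvNatFold, List.foldl_nil]
    constructor
    · intro h
      exact ⟨k, h, [], List.Sublist.refl _, by simp⟩
    · rintro ⟨j, hj, t, hsub, hsum⟩
      rw [List.sublist_nil] at hsub
      subst hsub
      simp only [List.sum_nil, add_zero, Nat.cast_inj] at hsum
      subst hsum; exact hj
  | cons s tl ih =>
    intro a k
    have hs0 : (0:Int) ≤ s := hs s (List.mem_cons_self ..)
    have hcast : ((s.toNat : Nat) : Int) = s := Int.toNat_of_nonneg hs0
    have htl : ∀ x ∈ tl, (0:Int) ≤ x := fun x hx => hs x (List.mem_cons_of_mem _ hx)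
    simp only [pvNatFold, List.foldl_cons] at *
    rw [ih htl (a ||| (a <<< s.toNat)) k]
    constructor
    · rintro ⟨j, hj, t, hsub, hsum⟩
      rw [Nat.testBit_or, Bool.or_eq_true, Nat.testBit_shiftLeft, Bool.and_eq_true, decide_eq_true_eq] at hj
      rcases hj with hj | ⟨hge, hj⟩
      · exact ⟨j, hj, t, List.Sublist.cons _ hsub, hsum⟩
      · refine ⟨j - s.toNat, hj, s :: t, List.Sublist.cons₂ _ hsub, ?_⟩
        simp only [List.sum_cons]
        have : ((j - s.toNat : Nat) : Int) = (j : Int) - s.toNat := by omega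
        rw [this]
        omega
    · rintro ⟨j, hj, t, hsub, hsum⟩
      rcases List.sublist_cons_iff.mp hsub with h | ⟨t', rfl, ht'⟩
      · refine ⟨j, ?_, t, h, hsum⟩
        rw [Nat.testBit_or, Bool.or_eq_true]; exact Or.inl hj
      · refine ⟨j + s.toNat, ?_, t', ht', ?_⟩
        · rw [Nat.testBit_or, Bool.or_eq_true, Nat.testBit_shiftLeft]
          right
          rw [Bool.and_eq_true, decide_eq_true_eq]
          exact ⟨by omega, by rwa [Nat.add_sub_cancel]⟩
        · simp only [List.sum_cons] at hsum
          push_cast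
          omega

-- B's divide and conquer computes exactly the sublist sums
lemma pv_reach_base (l : List Int) (hl : l.length ≤ 1) (v : Int) :
    v ∈ PySem.Set.union (PySem.Set.ofList [0]) (PySem.Set.ofList l) ↔ ∃ t : List Int, t.Sublist l ∧ t.sum = v := by
  rcases l with _ | ⟨x, _ | ⟨y, l3⟩⟩
  ·
    constructor
    · intro hv
      refine ⟨[], List.Sublist.refl _, ?_⟩
      simp only [PySem.Set.mem_union, PySem.Set.mem_ofList, List.mem_singleton, List.not_mem_nil,
        or_false] at hv
      simp [hv]
    · rintro ⟨t, hsub, rfl⟩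
      rw [List.sublist_nil] at hsub; subst hsub
      simp [PySem.Set.mem_union, PySem.Set.mem_ofList]
  ·
    constructor
    · intro hv
      simp only [PySem.Set.mem_union, PySem.Set.mem_ofList, List.mem_singleton] at hv
      rcases hv with rfl | rfl
      · exact ⟨[], by simp, by simp⟩
      · exact ⟨[v], List.Sublist.refl _, by simp⟩
    · rintro ⟨t, hsub, rfl⟩
      rcases List.sublist_cons_iff.mp hsub with h | ⟨t', rfl, ht'⟩
      · rw [List.sublist_nil] at h; subst h
        simp [PySem.Set.mem_union, PySem.Set.mem_ofList]
      · rw [List.sublist_nil] at ht'; subst ht'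
        simp [PySem.Set.mem_union, PySem.Set.mem_ofList]
  · simp only [List.length_cons] at hl; omega

lemma pv_reach_charF (fuel : Nat) : ∀ (l : List Int), l.length ≤ fuel + 1 →
    ∀ v : Int, v ∈ pvReachF fuel l ↔ ∃ t : List Int, t.Sublist l ∧ t.sum = v := by
  induction fuel with
  | zero =>
    intro l hl v
    exact pv_reach_base l (by omega) v
  | succ fuel ih =>
    intro l hl v
    rw [pvReachF]
    by_cases h1 : l.length ≤ 1
    · rw [if_pos h1]
      exact pv_reach_base l h1 v
    · rw [if_neg h1]
      have hta : (l.take (l.length / 2)).length ≤ fuel + 1 := by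
        simp only [List.length_take]; omega
      have hdr : (l.drop (l.length / 2)).length ≤ fuel + 1 := by
        simp only [List.length_drop]; omega
      simp only [PySem.Set.mem_ofList, List.mem_flatMap, List.mem_map]
      constructor
      · rintro ⟨a, ha, b, hb, rfl⟩
        obtain ⟨t1, ht1, rfl⟩ := (ih _ hta a).mp ha
        obtain ⟨t2, ht2, rfl⟩ := (ih _ hdr b).mp hb
        refine ⟨t1 ++ t2, ?_, by simp⟩
        have := List.Sublist.append ht1 ht2
        rwa [List.take_append_drop] at this
      · rintro ⟨t, hsub, rfl⟩
        have hsub' : t.Sublist (l.take (l.length / 2) ++ l.drop (l.length / 2)) := by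
          rwa [List.take_append_drop]
        obtain ⟨t1, t2, rfl, ht1, ht2⟩ := List.sublist_append_iff.mp hsub'
        exact ⟨t1.sum, (ih _ hta _).mpr ⟨t1, ht1, rfl⟩, t2.sum, (ih _ hdr _).mpr ⟨t2, ht2, rfl⟩, by simp⟩

lemma pv_reach_char (l : List Int) : ∀ v : Int, v ∈ pvReach l ↔ ∃ t : List Int, t.Sublist l ∧ t.sum = v :=
  pv_reach_charF l.length l (by omega)

theorem main_eq (stakes : List Int) (total : Int)
    (hs : ∀ s ∈ stakes, 0 ≤ s) (ht : -2 ≤ total) :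
    compute_s_coal_subset_py stakes total = compute_s_coal_subset_py_alt stakes total := by
  unfold compute_s_coal_subset_py compute_s_coal_subset_py_alt
  dsimp only
  set T : Int := -(PySem.Int.floordiv (-total) 3) with hTdef
  have hT0 : 0 ≤ T := pv_thresh_nonneg total ht
  have hfoldA : stakes.foldl (fun achievable s => PySem.Int.bor achievable (Int.shiftLeft achievable s.toNat)) (1:Int)
      = ((pvNatFold stakes 1 : Nat) : Int) := by
    have := pv_cast_fold stakes 1
    simpa using this
  rw [hfoldA]
  set aN := pvNatFold stakes 1 with haN
  set r := pvReach stakes with hr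
  have hinv : ∀ k : Nat, (aN.testBit k = true ↔ (k : Int) ∈ r) := by
    intro k
    rw [haN, pv_fold_char stakes hs 1 k, hr, pv_reach_char]
    constructor
    · rintro ⟨j, hj, t, hsub, hsum⟩
      rw [show (1:Nat) = 2 ^ 0 from rfl, Nat.testBit_two_pow, decide_eq_true_eq] at hj
      subst hj
      exact ⟨t, hsub, by simpa using hsum⟩
    · rintro ⟨t, hsub, hsum⟩
      exact ⟨0, by decide, t, hsub, by simpa using hsum⟩
  have hpos : ∀ v ∈ r, (0:Int) ≤ v := by
    intro v hv
    obtain ⟨t, hsub, rfl⟩ := (pv_reach_char stakes v).mp hv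
    exact List.sum_nonneg (fun x hx => hs x (hsub.subset hx))
  have hshift : ((aN : Nat) : Int) >>> T.toNat = ((aN >>> T.toNat : Nat) : Int) :=
    (Int.natCast_shiftRight aN T.toNat).symm
  rw [hshift]
  set mN := aN >>> T.toNat with hmN
  have hcast0 : (((mN : Nat) : Int) = 0) ↔ mN = 0 := by exact_mod_cast Iff.rfl
  by_cases hm : mN = 0
  · rw [if_pos (hcast0.mpr hm)]
    have hc : r.filter (fun v => decide (T ≤ v)) = [] := by
      rw [List.filter_eq_nil_iff]
      intro v hv
      simp only [decide_eq_true_eq]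
      intro hle
      have h0v : 0 ≤ v := hpos v hv
      have hbit : aN.testBit v.toNat = true := by
        rw [hinv]
        rwa [Int.toNat_of_nonneg h0v]
      have hge : T.toNat ≤ v.toNat := by omega
      have : mN.testBit (v.toNat - T.toNat) = true := by
        rw [hmN, Nat.testBit_shiftRight, (by omega : T.toNat + (v.toNat - T.toNat) = v.toNat)]
        exact hbit
      rw [hm, Nat.zero_testBit] at this
      exact absurd this (by simp)
    rw [hc]
    rfl
  · rw [if_neg (by rw [hcast0]; exact hm)]
    obtain ⟨j, hsub, hbit, hminb⟩ := pv_lowbit mN hm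
    rw [pv_band_neg mN hm, hsub]
    rw [Int.toNat_natCast, Nat.log2_two_pow]
    have hmemr : (T + (j:Int)) ∈ r := by
      have : aN.testBit (T.toNat + j) = true := by
        have h2 := hbit
        rw [hmN, Nat.testBit_shiftRight] at h2
        exact h2
      rw [hinv] at this
      have hcast : ((T.toNat + j : Nat) : Int) = T + j := by omega
      rwa [hcast] at this
    have hmemc : (T + (j:Int)) ∈ r.filter (fun v => decide (T ≤ v)) := by
      rw [List.mem_filter]
      refine ⟨hmemr, ?_⟩
      simp only [decide_eq_true_eq]
      omega
    rcases hmq : PySem.List.min? (r.filter (fun v => decide (T ≤ v))) (fun v => v) with _ | m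
    · rw [PySem.List.min?_eq_none_iff] at hmq
      rw [hmq] at hmemc
      exact absurd hmemc (List.not_mem_nil)
    · have hle : m ≤ T + j := PySem.List.min?_isMin hmq _ hmemc
      have hmc := PySem.List.min?_mem hmq
      rw [List.mem_filter] at hmc
      obtain ⟨hmr, hmT⟩ := hmc
      simp only [decide_eq_true_eq] at hmT
      have h0m : 0 ≤ m := hpos m hmr
      have hbitm : aN.testBit m.toNat = true := by
        rw [hinv]; rwa [Int.toNat_of_nonneg h0m]
      have hgeT : T.toNat ≤ m.toNat := by omega
      have hbmN : mN.testBit (m.toNat - T.toNat) = true := by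
        rw [hmN, Nat.testBit_shiftRight, (by omega : T.toNat + (m.toNat - T.toNat) = m.toNat)]
        exact hbitm
      have hjle : j ≤ m.toNat - T.toNat := by
        by_contra hlt
        rw [Nat.not_le] at hlt
        rw [hminb _ hlt] at hbmN
        exact absurd hbmN (by simp)
      have : T + (j:Int) ≤ m := by omega
      have hmeq : m = T + j := le_antisymm hle this
      rw [hmeq]
      push_cast
      ring

-- ===== VERDICT (by name: the statement is the Claim_ definition above) =====
theorem compute_s_coal_subset_py_spec : Claim_equal_compute_s_coal_subset_py := by
  intro stakes total _hdom hpre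
  unfold Spec_compute_s_coal_subset_py
  exact main_eq stakes total hpre.1 hpre.2
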